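-- pv_equiv track=rewrite | github.com/mxtdluffy/UNSW-CSE-COURSES | COMP9021/Quiz/quiz_5/quiz_5.py | code_derived_set
-- ===== SOURCE A (Python) =====
-- def decode(encoded_set):
--     decode_set = []
--     binary_str = bin(encoded_set)[2:]
--     bits = [0] * len(binary_str)
--     cur = 1
--     cnt = 1
--     while cnt < len(binary_str):
--         if cnt % 2 == 1:
--             bits[-1 - cnt] = -1 * cur
--             cnt += 1
--         elif cnt % 2 == 0:
--             bits[-1 - cnt] = cur
--             cur += 1
--             cnt += 1
--
--     for i in range(len(binary_str)):
--         if binary_str[i] == '1':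
--             decode_set.append(bits[i])
--
--     decode_set = sorted(decode_set)
--     return decode_set
--
-- def code_derived_set(encoded_set):
--     derived_set = []
--     decode_set = decode(encoded_set)
--     code_of_derived = 0
--     tmp = 0
--     for i in range(len(decode_set)):
--         tmp += decode_set[i]
--         derived_set.append(tmp)
--     derived_set = sorted(list(set(derived_set)))
--
--     for i in range(len(derived_set)):
--         if derived_set[i] < 0:
--             code_of_derived += 2 ** (- derived_set[i] * 2 - 1)
--         else:
--             code_of_derived += 2 ** (derived_set[i] * 2)
--
--     return code_of_derived
-- ===== SOURCE B (Python) =====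
-- def code_derived_set(encoded_set):
--     # bit-arithmetic reimplementation: no strings, no lists, no sorting;
--     # iterate candidate values in increasing numeric order, test membership
--     # by bit position, accumulate prefix sums, dedup via bitwise OR.
--     n = abs(encoded_set)
--     L = n.bit_length()
--     tmp = 0
--     code = 0
--     for v in range(-(L // 2), (L - 1) // 2 + 1):
--         pos = 2 * v if v >= 0 else -2 * v - 1
--         if n >> pos & 1:
--             tmp += v
--             code |= 1 << (2 * tmp if tmp >= 0 else -2 * tmp - 1)
--     return code
-- ===== Notes on version B (the rewrite author's own statement) =====
-- stated objective: simpler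
-- what changed: B drops A's string/list pipeline entirely (bin() string, bits lookup table, list building, sorted(), set()): it iterates candidate values in increasing numeric order over a range derived from bit_length(), tests membership with a shift-and-mask, and deduplicates the re-encoded prefix sums by bitwise OR into the result integer.
import Mathlib
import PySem

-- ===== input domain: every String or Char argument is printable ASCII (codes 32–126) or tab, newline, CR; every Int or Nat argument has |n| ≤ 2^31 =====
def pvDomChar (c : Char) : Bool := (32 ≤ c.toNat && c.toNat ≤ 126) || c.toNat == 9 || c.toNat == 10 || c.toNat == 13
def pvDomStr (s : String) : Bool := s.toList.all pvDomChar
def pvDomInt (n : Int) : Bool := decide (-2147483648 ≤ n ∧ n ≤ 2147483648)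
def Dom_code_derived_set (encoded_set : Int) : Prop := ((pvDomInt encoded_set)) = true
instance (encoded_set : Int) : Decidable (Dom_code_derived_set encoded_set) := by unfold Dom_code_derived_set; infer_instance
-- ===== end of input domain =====

-- B replaces A's string/list pipeline (bin() string, bits table, list building, two sorts, set())
-- by a single arithmetic pass over candidate values with shift-and-mask membership tests and
-- bitwise-OR deduplication (objective: simpler).

-- ===== PORT A =====
-- the while-loop of decode: writes bits[-1 - cnt] while cnt < len(binary_str)
-- (Python's 'elif cnt % 2 == 0' is the exhaustive complement of 'cnt % 2 == 1' since
--  PySem.Int.mod cnt 2 ∈ {0,1}, so it is ported as the plain 'else' branch)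
def pvBitsLoop (n : Int) (bits : List Int) (cur cnt : Int) : List Int :=
  if _h : cnt < n then
    if PySem.Int.mod cnt 2 = 1 then
      pvBitsLoop n (PySem.List.pySetD bits (-1 - cnt) (-1 * cur)) cur (cnt + 1)
    else
      pvBitsLoop n (PySem.List.pySetD bits (-1 - cnt) cur) (cur + 1) (cnt + 1)
  else bits
termination_by (n - cnt).toNat
decreasing_by all_goals omega

-- decode(encoded_set): bin(x)[2:] (string slice ported on the char list, exact), bits table, filter loop, sorted
def pvDecode (encoded_set : Int) : List Int :=
  let binary_str : List Char := PySem.List.slice (PySem.Int.pyBin encoded_set).toList (some 2) none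
  let bits : List Int := List.replicate binary_str.length 0
  let bits := pvBitsLoop (binary_str.length : Int) bits 1 1
  let decode_set := (PySem.List.pyRange 0 (PySem.List.len binary_str) 1).foldl
    (fun acc i => if PySem.List.pyGetD binary_str i ' ' = '1'
                  then acc ++ [PySem.List.pyGetD bits i 0] else acc) []
  PySem.List.sorted decode_set (fun x => x)

def code_derived_set (encoded_set : Int) : Int :=
  let decode_set := pvDecode encoded_set
  -- prefix-sum loop: tmp accumulator and derived_set list
  let st := (PySem.List.pyRange 0 (PySem.List.len decode_set) 1).foldl
    (fun (st : Int × List Int) i =>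
      let tmp := st.1 + PySem.List.pyGetD decode_set i 0
      (tmp, st.2 ++ [tmp])) (0, [])
  let derived_set := PySem.List.sorted (PySem.Set.ofList st.2) (fun x => x)
  -- re-encoding loop; Python's 2 ** e has e ≥ 0 in each branch, so '.toNat' is exact here
  derived_set.foldl
    (fun acc v => acc + if v < 0 then (2:Int) ^ (-v * 2 - 1).toNat else (2:Int) ^ (v * 2).toNat) 0

-- ===== PORT B =====
-- Source B: n = abs(e); L = n.bit_length(); one pass over range(-(L//2), (L-1)//2+1) testing
-- 'n >> pos & 1' and OR-ing '1 << pos(tmp)' into the result.  All shift amounts are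
-- nonnegative by construction, so '.toNat' is exact here.
def code_derived_set_alt (encoded_set : Int) : Int :=
  let n : Int := |encoded_set|
  let L : Nat := PySem.Int.bitLength n
  let st := (PySem.List.pyRange (-(PySem.Int.floordiv (L : Int) 2))
              (PySem.Int.floordiv ((L : Int) - 1) 2 + 1) 1).foldl
    (fun (st : Int × Int) v =>
      let pos : Int := if v ≥ 0 then 2 * v else -2 * v - 1
      if PySem.Int.band (n >>> pos.toNat) 1 ≠ 0 then
        let tmp := st.1 + v
        (tmp, PySem.Int.bor st.2 ((1 : Int) <<< (if tmp ≥ 0 then 2 * tmp else -2 * tmp - 1).toNat))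
      else st) (0, 0)
  st.2

-- ===== PRECONDITION & SPEC =====
def Spec_code_derived_set (encoded_set : Int) (out : Int) : Prop := out = code_derived_set_alt encoded_set
instance (encoded_set : Int) (out : Int) : Decidable (Spec_code_derived_set encoded_set out) := by unfold Spec_code_derived_set; infer_instance

-- ===== CLAIM (what is proved, stated in full; the proofs are below) =====
def Claim_equal_code_derived_set : Prop := ∀ (encoded_set : Int), Dom_code_derived_set encoded_set → Spec_code_derived_set encoded_set (code_derived_set encoded_set)

-- ===== LEMMAS AND PROOFS =====

-- zigzag encoding of a value to its bit position (matches both ports' branch expressions)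
def encN (v : Int) : Nat := (if v ≥ 0 then 2 * v else -2 * v - 1).toNat

-- zigzag decoding of a bit position (the value A's bits table holds at distance r from the right)
def pvPosVal (r : Int) : Int :=
  if PySem.Int.mod r 2 = 0 then PySem.Int.floordiv r 2 else -(PySem.Int.floordiv r 2 + 1)

theorem pvPosVal_encN (v : Int) : pvPosVal ((encN v : Nat) : Int) = v := by
  unfold encN
  rcases le_or_gt 0 v with h | h
  · rw [if_pos (by omega : v ≥ 0)]
    have h2 : (((2 * v).toNat : Int)) = 2 * v := by omega
    rw [h2]
    unfold pvPosVal
    rw [PySem.Int.mod_eq_emod_of_pos (by omega), PySem.Int.floordiv_eq_ediv_of_pos (by omega)]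
    split_ifs <;> omega
  · rw [if_neg (by omega : ¬ v ≥ 0)]
    have h2 : (((-2 * v - 1).toNat : Int)) = -2 * v - 1 := by omega
    rw [h2]
    unfold pvPosVal
    rw [PySem.Int.mod_eq_emod_of_pos (by omega), PySem.Int.floordiv_eq_ediv_of_pos (by omega)]
    split_ifs <;> omega

theorem encN_pvPosVal (r : Nat) : encN (pvPosVal (r : Int)) = r := by
  unfold pvPosVal encN
  rw [PySem.Int.mod_eq_emod_of_pos (by omega), PySem.Int.floordiv_eq_ediv_of_pos (by omega)]
  split_ifs <;> omega

theorem encN_inj (a b : Int) (h : encN a = encN b) : a = b := by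
  have ha := pvPosVal_encN a
  rw [h, pvPosVal_encN b] at ha
  exact ha.symm

-- ---- the bits table A builds (reused invariant machinery) ----

def pvTail (m : Nat) : List Int := (List.range m).map (fun j : Nat => pvPosVal ((m : Int) - 1 - (j : Int)))

theorem pvTail_length (m : Nat) : (pvTail m).length = m := by simp [pvTail]

theorem pvTail_succ (m : Nat) : pvTail (m + 1) = pvPosVal m :: pvTail m := by
  simp only [pvTail, List.range_succ_eq_map, List.map_cons, List.map_map]
  refine congrArg₂ List.cons ?_ ?_
  · refine congrArg pvPosVal ?_; push_cast; ring
  · refine List.map_congr_left fun j hj => ?_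
    refine congrArg pvPosVal ?_; push_cast; ring

theorem pvPosVal_odd (cnt : Int) (h1 : 1 ≤ cnt) (h : PySem.Int.mod cnt 2 = 1) :
    -1 * PySem.Int.floordiv (cnt + 1) 2 = pvPosVal cnt := by
  unfold pvPosVal
  rw [PySem.Int.mod_eq_emod_of_pos (by omega)] at h ⊢
  rw [PySem.Int.floordiv_eq_ediv_of_pos (by omega),
      PySem.Int.floordiv_eq_ediv_of_pos (by omega)]
  split_ifs <;> omega

theorem pvPosVal_even (cnt : Int) (h1 : 1 ≤ cnt) (h : ¬ PySem.Int.mod cnt 2 = 1) :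
    PySem.Int.floordiv (cnt + 1) 2 = pvPosVal cnt := by
  unfold pvPosVal
  rw [PySem.Int.mod_eq_emod_of_pos (by omega)] at h ⊢
  rw [PySem.Int.floordiv_eq_ediv_of_pos (by omega),
      PySem.Int.floordiv_eq_ediv_of_pos (by omega)]
  split_ifs <;> omega

theorem pv_cur_odd (cnt : Int) (h1 : 1 ≤ cnt) (h : PySem.Int.mod cnt 2 = 1) :
    PySem.Int.floordiv (cnt + 1) 2 = PySem.Int.floordiv (cnt + 1 + 1) 2 := by
  rw [PySem.Int.mod_eq_emod_of_pos (by omega)] at h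
  rw [PySem.Int.floordiv_eq_ediv_of_pos (by omega),
      PySem.Int.floordiv_eq_ediv_of_pos (by omega)]
  omega

theorem pv_cur_even (cnt : Int) (h1 : 1 ≤ cnt) (h : ¬ PySem.Int.mod cnt 2 = 1) :
    PySem.Int.floordiv (cnt + 1) 2 + 1 = PySem.Int.floordiv (cnt + 1 + 1) 2 := by
  rw [PySem.Int.mod_eq_emod_of_pos (by omega)] at h
  rw [PySem.Int.floordiv_eq_ediv_of_pos (by omega),
      PySem.Int.floordiv_eq_ediv_of_pos (by omega)]
  omega

theorem pv_set_step (u : Nat) (cnt : Int) (h1 : 1 ≤ cnt) (zeros tail : List Int)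
    (hz : zeros.length = u + 1) (ht : tail.length = cnt.toNat) (v : Int) :
    PySem.List.pySetD (zeros ++ tail) (-1 - cnt) v = zeros.take u ++ (v :: tail) := by
  have hL : (zeros ++ tail).length = u + 1 + cnt.toNat := by simp [hz, ht]
  unfold PySem.List.pySetD PySem.List.pySet? PySem.List.pyIdx?
  rw [hL]
  have hneg : ¬ (0 ≤ -1 - cnt) := by omega
  have hge : -(↑(u + 1 + cnt.toNat) : Int) ≤ -1 - cnt := by push_cast; omega
  simp only [if_neg hneg, if_pos hge, Option.map_some, Option.getD_some]
  have hidx : u + 1 + cnt.toNat - (-(-1 - cnt)).toNat = u := by omega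
  rw [hidx]
  rw [List.set_append_left _ _ (by omega)]
  have : zeros.set u v = zeros.take u ++ [v] := by
    rw [List.set_eq_take_append_cons_drop, if_pos (by omega)]
    have : zeros.drop (u + 1) = [] := by
      apply List.drop_eq_nil_of_le; omega
    simp [this]
  rw [this, List.append_assoc]
  rfl

theorem pvBitsLoop_inv (u : Nat) : ∀ (cnt : Int) (zeros : List Int),
    zeros.length = u → 1 ≤ cnt →
    pvBitsLoop ((u : Int) + cnt) (zeros ++ pvTail cnt.toNat) (PySem.Int.floordiv (cnt + 1) 2) cnt
      = pvTail (u + cnt.toNat) := by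
  induction u with
  | zero =>
    intro cnt zeros hz h1
    rw [List.length_eq_zero_iff] at hz
    subst hz
    rw [pvBitsLoop]
    simp
  | succ u ih =>
    intro cnt zeros hz h1
    rw [pvBitsLoop]
    have hlt : cnt < (↑(u + 1) : Int) + cnt := by push_cast; omega
    rw [dif_pos hlt]
    have htail : (pvTail cnt.toNat).length = cnt.toNat := pvTail_length _
    have hcast : ((cnt + 1).toNat) = cnt.toNat + 1 := by omega
    have hsucc : pvTail (cnt + 1).toNat = pvPosVal cnt :: pvTail cnt.toNat := by
      rw [hcast, pvTail_succ]
      have : ((cnt.toNat : Int)) = cnt := by omega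
      rw [this]
    by_cases hmod : PySem.Int.mod cnt 2 = 1
    · rw [if_pos hmod]
      rw [pv_set_step u cnt h1 zeros _ hz htail]
      rw [pvPosVal_odd cnt h1 hmod, ← hsucc]
      have harg : (↑(u + 1) : Int) + cnt = (↑u : Int) + (cnt + 1) := by push_cast; ring
      rw [harg, pv_cur_odd cnt h1 hmod]
      rw [ih (cnt + 1) (zeros.take u) (by simp [hz]) (by omega)]
      congr 1
      omega
    · rw [if_neg hmod]
      rw [pv_set_step u cnt h1 zeros _ hz htail]
      have harg : (↑(u + 1) : Int) + cnt = (↑u : Int) + (cnt + 1) := by push_cast; ring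
      rw [harg, pv_cur_even cnt h1 hmod, pvPosVal_even cnt h1 hmod, ← hsucc]
      rw [ih (cnt + 1) (zeros.take u) (by simp [hz]) (by omega)]
      congr 1
      omega

theorem pvBits_eq (n : Nat) (hn : 1 ≤ n) :
    pvBitsLoop (n : Int) (List.replicate n 0) 1 1 = pvTail n := by
  have h0 : pvTail 1 = [0] := by decide
  have hrep : List.replicate n (0 : Int) = List.replicate (n - 1) 0 ++ pvTail 1 := by
    rw [h0]
    rw [← List.replicate_succ' (n := n - 1)]
    congr 1
    omega
  have hcur : PySem.Int.floordiv (1 + 1) 2 = 1 := by decide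
  have harg : ((n : Nat) : Int) = ((n - 1 : Nat) : Int) + 1 := by omega
  have := pvBitsLoop_inv (n - 1) 1 (List.replicate (n - 1) 0) (by simp) (by omega)
  simp only [Int.toNat_one] at this
  rw [hcur] at this
  rw [hrep, harg, this]
  congr 1
  omega

theorem pvTail_getD (n : Nat) (j : Int) (h0 : 0 ≤ j) (hj : j < (n : Int)) :
    PySem.List.pyGetD (pvTail n) j 0 = pvPosVal ((n : Int) - 1 - j) := by
  rw [PySem.List.pyGetD_eq_getElem (pvTail n) 0 h0 (by rw [pvTail_length]; omega)]
  simp only [pvTail, List.getElem_map, List.getElem_range]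
  refine congrArg pvPosVal ?_
  omega

-- ---- A's decode characterised as a filter + map over the bin() string ----

def pvSliceOf (e : Int) : List Char := PySem.List.slice (PySem.Int.pyBin e).toList (some 2) none

def pvValsOf (s : List Char) : List Int :=
  ((PySem.List.pyRange 0 (PySem.List.len s) 1).filter
      (fun i => PySem.List.pyGetD s i ' ' == '1')).map
    (fun i => pvPosVal ((s.length : Int) - 1 - i))

theorem pv_decode_eq (e : Int) :
    pvDecode e = PySem.List.sorted (pvValsOf (pvSliceOf e)) (fun x => x) := by
  simp only [pvDecode, pvValsOf, pvSliceOf]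
  set s : List Char := PySem.List.slice (PySem.Int.pyBin e).toList (some 2) none with hs
  refine congrArg (fun l => PySem.List.sorted l (fun x => x)) ?_
  have hfa := PySem.List.foldl_append_if (fun i => PySem.List.pyGetD s i ' ' == '1')
        (fun i => pvPosVal ((s.length : Int) - 1 - i)) (PySem.List.pyRange 0 (PySem.List.len s) 1) []
  rw [List.nil_append] at hfa
  rw [← hfa]
  refine PySem.List.foldl_congr_mem _ _ _ _ fun acc j hj => ?_
  rw [PySem.List.mem_pyRange_one] at hj
  simp only [PySem.List.len_eq] at hj
  rcases Nat.eq_zero_or_pos s.length with h0 | hpos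
  · omega
  · rw [pvBits_eq s.length hpos]
    by_cases hc : PySem.List.pyGetD s j ' ' = '1'
    · rw [if_pos hc, if_pos (by simpa using hc)]
      rw [pvTail_getD s.length j (by omega) (by omega)]
    · rw [if_neg hc, if_neg (by simpa using hc)]

-- closed form of Nat.toDigits 2
def pvBinRep (m : Nat) : List Char :=
  (List.range (PySem.Int.bitLength (m : Int))).map
    (fun i => if m.testBit (PySem.Int.bitLength (m : Int) - 1 - i) then '1' else '0')

theorem pv_toDigits_eq (m : Nat) (hm : 0 < m) : Nat.toDigits 2 m = pvBinRep m := by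
  induction m using Nat.strong_induction_on with
  | _ m ih =>
    by_cases h2 : m < 2
    · have hm1 : m = 1 := by omega
      subst hm1
      decide
    · rw [Nat.toDigits_of_base_le (by norm_num) (by omega)]
      have hhalf : 0 < m / 2 := by omega
      rw [ih (m / 2) (by omega) hhalf]
      have hL : PySem.Int.bitLength (m : Int) = PySem.Int.bitLength ((m / 2 : Nat) : Int) + 1 :=
        PySem.Int.bitLength_natCast hm
      have hstep : pvBinRep m = pvBinRep (m / 2) ++ [(m % 2).digitChar] := by
        unfold pvBinRep
        rw [hL, List.range_succ, List.map_append]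
        congr 1
        · refine List.map_congr_left fun i hi => ?_
          rw [List.mem_range] at hi
          have he : PySem.Int.bitLength ((m / 2 : Nat) : Int) + 1 - 1 - i
              = (PySem.Int.bitLength ((m / 2 : Nat) : Int) - 1 - i) + 1 := by omega
          rw [he, Nat.testBit_add_one]
        · simp only [List.map_cons, List.map_nil]
          have he : PySem.Int.bitLength ((m / 2 : Nat) : Int) + 1 - 1
              - PySem.Int.bitLength ((m / 2 : Nat) : Int) = 0 := by omega
          rw [he, Nat.testBit_zero]
          rcases Nat.mod_two_eq_zero_or_one m with h | h <;> simp [h, Nat.digitChar]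
      rw [hstep]

theorem pv_bitLength_natAbs (e : Int) :
    PySem.Int.bitLength ((e.natAbs : Nat) : Int) = PySem.Int.bitLength e := by
  unfold PySem.Int.bitLength
  rw [Int.natAbs_natCast]

theorem pvBinRep_length (m : Nat) : (pvBinRep m).length = PySem.Int.bitLength (m : Int) := by
  simp [pvBinRep]

theorem pv_slice_cases (e : Int) :
    pvSliceOf e = (if e < 0 then ['b'] else []) ++ Nat.toDigits 2 e.natAbs := by
  unfold pvSliceOf
  rw [show (PySem.Int.pyBin e).toList = PySem.Int.toBinChars0b e from by
        simp [PySem.Int.pyBin]]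
  rw [PySem.List.slice_from _ (by omega : (0:Int) ≤ 2)]
  unfold PySem.Int.toBinChars0b
  split_ifs with h
  · simp
  · have : e.toNat = e.natAbs := by omega
    simp [this]

theorem pv_mem_valsOf_rep (pre : List Char) (hpre : ∀ c ∈ pre, c ≠ '1') (m : Nat) (x : Int) :
    x ∈ pvValsOf (pre ++ Nat.toDigits 2 m) ↔
      ∃ r : Nat, r < PySem.Int.bitLength (m : Int) ∧ m.testBit r ∧ x = pvPosVal (r : Int) := by
  have hmem : ∀ (s : List Char),
      x ∈ pvValsOf s ↔ ∃ i : Int, (0 ≤ i ∧ i < (s.length : Int)) ∧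
        (PySem.List.pyGetD s i ' ' = '1') ∧ x = pvPosVal ((s.length : Int) - 1 - i) := by
    intro s
    unfold pvValsOf
    simp only [List.mem_map, List.mem_filter, PySem.List.mem_pyRange_one, PySem.List.len_eq,
      beq_iff_eq]
    constructor
    · rintro ⟨i, ⟨⟨h0, h1⟩, h2⟩, h3⟩; exact ⟨i, ⟨h0, h1⟩, h2, h3.symm⟩
    · rintro ⟨i, ⟨h0, h1⟩, h2, h3⟩; exact ⟨i, ⟨⟨h0, h1⟩, h2⟩, h3.symm⟩
  rcases Nat.eq_zero_or_pos m with rfl | hm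
  · rw [Nat.toDigits_zero, hmem]
    constructor
    · rintro ⟨i, ⟨h0, h1⟩, h2, -⟩
      exfalso
      rw [PySem.List.pyGetD_eq_getElem _ _ h0
            (by simp at h1 ⊢; omega)] at h2
      have hms : (pre ++ ['0'])[i.toNat] ∈ pre ++ ['0'] := List.getElem_mem _
      rcases List.mem_append.mp hms with hin | hin
      · exact hpre _ (h2 ▸ hin) rfl
      · simp at hin; rw [hin] at h2; exact absurd h2 (by decide)
    · rintro ⟨r, hr, -, -⟩
      rw [show PySem.Int.bitLength ((0:Nat) : Int) = 0 from PySem.Int.bitLength_zero] at hr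
      omega
  · rw [pv_toDigits_eq m hm, hmem]
    have hL1 : 1 ≤ PySem.Int.bitLength (m : Int) := by
      rw [PySem.Int.bitLength_natCast hm]; omega
    set L := PySem.Int.bitLength (m : Int) with hLdef
    have hlen : (pre ++ pvBinRep m).length = pre.length + L := by
      simp [pvBinRep_length, ← hLdef]
    constructor
    · rintro ⟨i, ⟨h0, h1⟩, h2, h3⟩
      rw [hlen] at h1
      rw [PySem.List.pyGetD_eq_getElem _ _ h0 (by rw [hlen]; omega)] at h2
      by_cases hcase : i.toNat < pre.length
      · exfalso
        rw [List.getElem_append_left hcase] at h2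
        exact hpre _ (h2 ▸ List.getElem_mem _) rfl
      · rw [List.getElem_append_right (by omega)] at h2
        set j := i.toNat - pre.length with hjdef
        have hj : j < L := by
          have := pvBinRep_length m
          omega
        rw [show (pvBinRep m)[j]'(by rw [pvBinRep_length]; omega)
              = if m.testBit (L - 1 - j) then '1' else '0' from by
            simp [pvBinRep, ← hLdef]] at h2
        refine ⟨L - 1 - j, by omega, ?_, ?_⟩
        · by_contra hb
          rw [Bool.not_eq_true] at hb
          rw [hb] at h2
          simp at h2
        · rw [h3, hlen]
          refine congrArg pvPosVal ?_
          omega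
    · rintro ⟨r, hr, hbit, hx⟩
      refine ⟨((pre.length + (L - 1 - r) : Nat) : Int), ⟨by omega, by rw [hlen]; push_cast; omega⟩,
        ?_, ?_⟩
      · rw [PySem.List.pyGetD_eq_getElem _ _ (by omega)
              (by rw [hlen]; omega)]
        rw [List.getElem_append_right (by omega)]
        rw [show (pvBinRep m)[((pre.length + (L - 1 - r) : Nat) : Int).toNat - pre.length]'(by
              rw [pvBinRep_length]; omega)
              = if m.testBit (L - 1 - (((pre.length + (L - 1 - r) : Nat) : Int).toNat - pre.length))
                then '1' else '0' from by simp [pvBinRep, ← hLdef]]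
        have : L - 1 - (((pre.length + (L - 1 - r) : Nat) : Int).toNat - pre.length) = r := by
          omega
        rw [this, hbit]
        rfl
      · rw [hx, hlen]
        refine congrArg pvPosVal ?_
        push_cast
        omega

theorem pv_mem_valsOf (e : Int) (x : Int) :
    x ∈ pvValsOf (pvSliceOf e) ↔
      ∃ r : Nat, r < PySem.Int.bitLength e ∧ e.natAbs.testBit r ∧ x = pvPosVal (r : Int) := by
  rw [pv_slice_cases, pv_mem_valsOf_rep _ (by split_ifs <;> simp) e.natAbs x,
      pv_bitLength_natAbs]

theorem pvPosVal_inj_nonneg (a b : Int) (ha : 0 ≤ a) (hb : 0 ≤ b)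
    (h : pvPosVal a = pvPosVal b) : a = b := by
  have h1 := encN_pvPosVal a.toNat
  have h2 := encN_pvPosVal b.toNat
  rw [Int.toNat_of_nonneg ha] at h1
  rw [Int.toNat_of_nonneg hb] at h2
  rw [h] at h1
  omega

theorem pv_nodup_valsOf (s : List Char) : (pvValsOf s).Nodup := by
  unfold pvValsOf
  refine List.Nodup.map_on ?_ ((PySem.List.nodup_pyRange_one _ _).filter _)
  intro i hi i' hi' hf
  have h1 := PySem.List.mem_pyRange_one.mp (List.mem_filter.mp hi).1
  have h2 := PySem.List.mem_pyRange_one.mp (List.mem_filter.mp hi').1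
  simp only [PySem.List.len_eq] at h1 h2
  have := pvPosVal_inj_nonneg _ _ (by omega) (by omega) hf
  omega

-- ---- B's filtered range ----

def pvV (e : Int) : List Int :=
  (PySem.List.pyRange (-(PySem.Int.floordiv ((PySem.Int.bitLength |e| : Nat) : Int) 2))
      (PySem.Int.floordiv (((PySem.Int.bitLength |e| : Nat) : Int) - 1) 2 + 1) 1).filter
    (fun v => decide (PySem.Int.band (|e| >>> ((if v ≥ 0 then 2 * v else -2 * v - 1).toNat)) 1 ≠ 0))

theorem pv_bitLength_abs (e : Int) : PySem.Int.bitLength |e| = PySem.Int.bitLength e := by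
  unfold PySem.Int.bitLength
  rw [Int.natAbs_abs]

theorem pv_cond_iff (e v : Int) :
    (PySem.Int.band (|e| >>> ((if v ≥ 0 then 2 * v else -2 * v - 1).toNat)) 1 ≠ 0) ↔
      e.natAbs.testBit (encN v) := by
  rw [show ((if v ≥ 0 then 2 * v else -2 * v - 1).toNat) = encN v from rfl]
  rw [Int.abs_eq_natAbs, ← Int.natCast_shiftRight,
      show (1 : Int) = ((1 : Nat) : Int) from rfl, PySem.Int.band_natCast]
  rw [Nat.and_one_is_mod]
  have hx : (((e.natAbs >>> encN v) % 2 : Nat) : Int) ≠ 0 ↔ (e.natAbs >>> encN v) % 2 = 1 := by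
    omega
  rw [hx]
  simp only [Nat.testBit, Nat.one_and_eq_mod_two, bne_iff_ne, ne_eq]
  omega

theorem pv_mem_V (e : Int) (x : Int) :
    x ∈ pvV e ↔
      ∃ r : Nat, r < PySem.Int.bitLength e ∧ e.natAbs.testBit r ∧ x = pvPosVal (r : Int) := by
  unfold pvV
  rw [List.mem_filter, PySem.List.mem_pyRange_one, pv_bitLength_abs]
  rw [show (decide (PySem.Int.band (|e| >>> ((if x ≥ 0 then 2 * x else -2 * x - 1).toNat)) 1 ≠ 0)
        = true) ↔ e.natAbs.testBit (encN x) from by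
      rw [decide_eq_true_eq]; exact pv_cond_iff e x]
  set L := PySem.Int.bitLength e with hL
  constructor
  · rintro ⟨⟨hlo, hhi⟩, hbit⟩
    refine ⟨encN x, ?_, hbit, (pvPosVal_encN x).symm⟩
    by_contra hge
    have h2 : 2 ^ L ≤ 2 ^ encN x := Nat.pow_le_pow_right (by omega) (by omega)
    have h3 := PySem.Int.lt_two_pow_bitLength e
    rw [← hL] at h3
    exact absurd hbit (by rw [Nat.testBit_lt_two_pow (by omega)]; simp)
  · rintro ⟨r, hr, hbit, hx⟩
    have henc : encN x = r := by rw [hx]; exact encN_pvPosVal r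
    refine ⟨?_, henc ▸ hbit⟩
    rw [hx]
    unfold pvPosVal
    simp only [PySem.Int.mod_eq_emod_of_pos (by omega : (0:Int) < 2),
      PySem.Int.floordiv_eq_ediv_of_pos (by omega : (0:Int) < 2)]
    constructor
    · split_ifs <;> omega
    · split_ifs <;> omega

theorem pv_sorted_vals (e : Int) :
    PySem.List.sorted (pvValsOf (pvSliceOf e)) (fun x => x) = pvV e := by
  refine PySem.List.sorted_eq_of_perm_of_pairwise_lt _ _ _ ?_ ?_
  · refine (List.perm_ext_iff_of_nodup ((PySem.List.nodup_pyRange_one _ _).filter _)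
      (pv_nodup_valsOf _)).mpr ?_
    intro x
    rw [pv_mem_valsOf]
    exact pv_mem_V e x
  · exact (PySem.List.pairwise_lt_pyRange_one _ _).filter _

-- ---- prefix sums ----

def pvPref : List Int → Int → List Int
  | [], _ => []
  | v :: l, t => (t + v) :: pvPref l (t + v)

theorem pvPref_foldA (l : List Int) : ∀ (t : Int) (acc : List Int),
    (l.foldl (fun (st : Int × List Int) v => (st.1 + v, st.2 ++ [st.1 + v])) (t, acc)).2
      = acc ++ pvPref l t := by
  induction l with
  | nil => intro t acc; simp [pvPref]
  | cons v l ih => intro t acc; simp [pvPref, ih (t + v) (acc ++ [t + v])]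

theorem pvPref_foldOr (l : List Int) : ∀ (t c : Int),
    (l.foldl (fun (st : Int × Int) v =>
        (st.1 + v, PySem.Int.bor st.2 ((1 : Int) <<< encN (st.1 + v)))) (t, c)).2
      = (pvPref l t).foldl (fun c p => PySem.Int.bor c ((1 : Int) <<< encN p)) c := by
  induction l with
  | nil => intro t c; simp [pvPref]
  | cons v l ih => intro t c; simp [pvPref, ih (t + v)]

-- ---- Nat-level: sum of distinct powers of two = bitwise OR of the powers ----

theorem pv_lor_two_pow (p : Nat) : ∀ (a : Nat), a.testBit p = false → a ||| 2 ^ p = a + 2 ^ p := by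
  induction p with
  | zero =>
    intro a h
    have ha : a % 2 = 0 := by simpa [Nat.testBit_zero] using h
    have hbit : a = Nat.bit false (a / 2) := by simp [Nat.bit_val]; omega
    have h1 : (2 : Nat) ^ 0 = Nat.bit true 0 := by decide
    rw [h1, hbit, Nat.lor_bit]
    simp [Nat.bit_val]
  | succ p ih =>
    intro a h
    have hbit : a = Nat.bit (a.testBit 0) (a / 2) := by
      rw [Nat.testBit_zero, Nat.bit_val]
      rcases Nat.mod_two_eq_zero_or_one a with h' | h' <;> simp [h'] <;> omega
    have h2 : (2 : Nat) ^ (p + 1) = Nat.bit false (2 ^ p) := by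
      simp [Nat.bit_val]; ring
    have htail : (a / 2).testBit p = false := by rw [← Nat.testBit_add_one]; exact h
    conv_lhs => rw [hbit, h2, Nat.lor_bit]
    rw [Bool.or_false, ih (a / 2) htail]
    conv_rhs => rw [hbit, h2]
    simp [Nat.bit_val]
    ring

theorem pv_testBit_orfold (Q : List Nat) : ∀ (acc q : Nat),
    ((Q.foldl (fun c p => c ||| 2 ^ p) acc).testBit q) = (acc.testBit q || decide (q ∈ Q)) := by
  induction Q with
  | nil => intro acc q; simp
  | cons p Q ih =>
    intro acc q
    rw [List.foldl_cons, ih]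
    simp only [Nat.testBit_lor, Nat.testBit_two_pow, List.mem_cons]
    by_cases hq : q = p
    · subst hq; simp
    · have hpq : ¬ p = q := fun hc => hq hc.symm
      simp [hq, hpq]

theorem pv_addfold_eq_orfold (Q : List Nat) : ∀ (acc : Nat), Q.Nodup →
    (∀ q ∈ Q, acc.testBit q = false) →
    Q.foldl (fun c p => c + 2 ^ p) acc = Q.foldl (fun c p => c ||| 2 ^ p) acc := by
  induction Q with
  | nil => intro acc _ _; rfl
  | cons p Q ih =>
    intro acc hnd hbits
    rw [List.foldl_cons, List.foldl_cons,
        ← pv_lor_two_pow p acc (hbits p (by simp))]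
    refine ih _ (List.nodup_cons.mp hnd).2 fun q hq => ?_
    rw [Nat.testBit_lor, Nat.testBit_two_pow]
    have hqp : q ≠ p := fun hc => (List.nodup_cons.mp hnd).1 (hc ▸ hq)
    have hpq : ¬ p = q := fun hc => hqp hc.symm
    simp [hbits q (by simp [hq]), hpq]

theorem pv_orfold_ext (Q Q' : List Nat) (h : ∀ q, q ∈ Q ↔ q ∈ Q') :
    Q.foldl (fun c p => c ||| 2 ^ p) 0 = Q'.foldl (fun c p => c ||| 2 ^ p) 0 := by
  apply Nat.eq_of_testBit_eq
  intro i
  rw [pv_testBit_orfold, pv_testBit_orfold]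
  simp [h i]

-- ---- casts between the Int folds of the ports and the Nat folds above ----

theorem pv_cast_fold_add (D : List Int) : ∀ (a : Nat),
    D.foldl (fun (acc : Int) v => acc + (2:Int) ^ encN v) (a : Int)
      = (((D.map encN).foldl (fun c p => c + 2 ^ p) a : Nat) : Int) := by
  induction D with
  | nil => intro a; rfl
  | cons v D ih =>
    intro a
    rw [List.map_cons, List.foldl_cons, List.foldl_cons]
    have hc : ((a : Int) + (2:Int) ^ encN v) = ((a + 2 ^ encN v : Nat) : Int) := by
      push_cast; ring
    rw [hc, ih]

theorem pv_cast_fold_or (P : List Int) : ∀ (c : Nat),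
    P.foldl (fun (acc : Int) t => PySem.Int.bor acc ((1 : Int) <<< encN t)) (c : Int)
      = (((P.map encN).foldl (fun c p => c ||| 2 ^ p) c : Nat) : Int) := by
  induction P with
  | nil => intro c; rfl
  | cons t P ih =>
    intro c
    rw [List.map_cons, List.foldl_cons, List.foldl_cons]
    have hc : PySem.Int.bor (c : Int) ((1 : Int) <<< encN t) = ((c ||| 2 ^ encN t : Nat) : Int) := by
      rw [Int.shiftLeft_eq, one_mul,
          show ((2:Int) ^ encN t) = ((2 ^ encN t : Nat) : Int) by push_cast; ring,
          PySem.Int.bor_natCast]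
    rw [hc, ih]

theorem pv_alt_eq (e : Int) :
    code_derived_set_alt e
      = (pvPref (pvV e) 0).foldl (fun c p => PySem.Int.bor c ((1 : Int) <<< encN p)) 0 := by
  rw [← pvPref_foldOr (pvV e) 0 0]
  unfold pvV
  rw [List.foldl_filter]
  simp only [code_derived_set_alt]
  refine congrArg Prod.snd ?_
  refine PySem.List.foldl_congr_mem _ _ _ _ fun st v _ => ?_
  by_cases h : PySem.Int.band (|e| >>> ((if v ≥ 0 then 2 * v else -2 * v - 1).toNat)) 1 ≠ 0
  · simp only [if_pos h, decide_eq_true_eq, encN]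
  · simp only [if_neg h, decide_eq_true_eq]

-- ===== VERDICT (by name: the statement is the Claim_ definition above) =====
theorem code_derived_set_spec : Claim_equal_code_derived_set := by
  intro e _hdom
  unfold Spec_code_derived_set
  rw [pv_alt_eq]
  simp only [code_derived_set]
  rw [PySem.List.foldl_pyRange_zero_pyGetD (pvDecode e) 0
        (fun (st : Int × List Int) x => (st.1 + x, st.2 ++ [st.1 + x])) ((0 : Int), ([] : List Int))]
  rw [pvPref_foldA, List.nil_append]
  rw [pv_decode_eq, pv_sorted_vals]
  set P := pvPref (pvV e) 0 with hP
  set D := PySem.List.sorted (PySem.Set.ofList P) (fun x => x) with hD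
  have hA : D.foldl (fun acc v =>
        acc + if v < 0 then (2:Int) ^ (-v * 2 - 1).toNat else (2:Int) ^ (v * 2).toNat) 0
      = D.foldl (fun acc v => acc + (2:Int) ^ encN v) 0 := by
    refine PySem.List.foldl_congr_mem _ _ _ _ fun acc v _ => ?_
    unfold encN
    rcases lt_or_ge v 0 with h | h
    · rw [if_pos h, if_neg (by omega : ¬ v ≥ 0)]
      congr 2
      omega
    · rw [if_neg (by omega : ¬ v < 0), if_pos (by omega : v ≥ 0)]
      congr 2
      omega
  rw [hA]
  have hDnd : D.Nodup :=
    ((PySem.List.sorted_perm _ _ _).nodup_iff).mpr (PySem.Set.nodup_ofList P)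
  have hmm : ∀ q, q ∈ D.map encN ↔ q ∈ P.map encN := by
    intro q
    simp only [List.mem_map]
    constructor
    · rintro ⟨v, hv, rfl⟩
      exact ⟨v, (PySem.Set.mem_ofList P v).mp ((PySem.List.sorted_perm _ _ _).mem_iff.mp hv), rfl⟩
    · rintro ⟨v, hv, rfl⟩
      exact ⟨v, (PySem.List.sorted_perm _ _ _).mem_iff.mpr ((PySem.Set.mem_ofList P v).mpr hv), rfl⟩
  calc D.foldl (fun acc v => acc + (2:Int) ^ encN v) 0
      = (((D.map encN).foldl (fun c p => c + 2 ^ p) 0 : Nat) : Int) := by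
        simpa using pv_cast_fold_add D 0
    _ = (((D.map encN).foldl (fun c p => c ||| 2 ^ p) 0 : Nat) : Int) := by
        rw [pv_addfold_eq_orfold _ _ (hDnd.map (fun a b h => encN_inj a b h))
              (fun q _ => Nat.zero_testBit q)]
    _ = (((P.map encN).foldl (fun c p => c ||| 2 ^ p) 0 : Nat) : Int) := by
        rw [pv_orfold_ext _ _ hmm]
    _ = P.foldl (fun acc t => PySem.Int.bor acc ((1 : Int) <<< encN t)) 0 := by
        simpa using (pv_cast_fold_or P 0).symm
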